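-- pv_equiv track=rewrite | github.com/atholcomb/pycodechallenges | number_in_strings.py | numInStr
-- ===== SOURCE A (Python) =====
-- def numInStr(string_list):
--     nums = '1234567890'
--
--     result = set()
--     for num in nums:
--         for list_item in string_list:
--             if num in list_item:
--                 result.add(list_item)
--
--     return list(sorted(result))
-- ===== SOURCE B (Python) =====
-- def numInStr(string_list):
--     out = []
--     prev = None
--     for s in sorted(string_list):
--         if s != prev and any('0' <= c <= '9' for c in s):
--             out.append(s)
--         prev = s
--     return out
-- ===== Notes on version B (the rewrite author's own statement) =====
-- stated objective: alternative
-- what changed: Instead of A's nested loops filling a result set that is sorted at the end, B uses no set at all: it sorts the whole input list first (duplicates included), then makes one ordered scan that skips adjacent duplicates and emits strings containing a digit (tested by the character range '0'<=c<='9') directly into the output list, which is already in sorted order.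
import Mathlib
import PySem

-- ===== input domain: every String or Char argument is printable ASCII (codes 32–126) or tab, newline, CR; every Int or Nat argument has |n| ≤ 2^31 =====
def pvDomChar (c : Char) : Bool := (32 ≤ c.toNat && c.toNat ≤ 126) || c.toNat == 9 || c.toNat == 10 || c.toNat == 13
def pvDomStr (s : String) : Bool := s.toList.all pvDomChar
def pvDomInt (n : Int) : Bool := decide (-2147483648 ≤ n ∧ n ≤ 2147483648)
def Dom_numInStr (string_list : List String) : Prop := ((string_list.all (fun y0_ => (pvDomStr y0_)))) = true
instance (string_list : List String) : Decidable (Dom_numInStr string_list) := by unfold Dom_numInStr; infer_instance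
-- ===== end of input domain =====

-- B drops A's nested loops and result set entirely: it sorts the input first, then one ordered scan skips adjacent duplicates and emits digit-containing strings directly in sorted order (alternative decomposition, similar cost).


-- ===== PORT A =====
def numInStr (string_list : List String) : List String :=
  let nums : List Char := "1234567890".toList
  let result : PySem.Set String :=
    nums.foldl (fun result num =>
      string_list.foldl (fun result list_item =>
        if PySem.Str.isIn (String.ofList [num]) list_item then PySem.Set.add result list_item
        else result) result) PySem.Set.empty
  PySem.List.sorted result (fun x => x) false

-- ===== PORT B =====
-- out/prev accumulator of Source B's single scan over sorted(string_list): (out, prev)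
def numInStr_alt (string_list : List String) : List String :=
  let sortedAll := PySem.List.sorted string_list (fun x => x) false
  (sortedAll.foldl
    (fun (st : List String × Option String) s =>
      (if (st.2 != some s) && s.toList.any (fun c => decide ('0' ≤ c) && decide (c ≤ '9'))
       then st.1 ++ [s] else st.1, some s))
    ([], none)).1

-- ===== PRECONDITION & SPEC =====
def Spec_numInStr (string_list : List String) (out : List String) : Prop := out = numInStr_alt string_list
instance (string_list : List String) (out : List String) : Decidable (Spec_numInStr string_list out) := by unfold Spec_numInStr; infer_instance

-- ===== CLAIM (what is proved, stated in full; the proofs are below) =====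
def Claim_equal_numInStr : Prop := ∀ (string_list : List String), Dom_numInStr string_list → Spec_numInStr string_list (numInStr string_list)

-- ===== LEMMAS AND PROOFS =====

-- B's digit test, as a named predicate for the proofs
def hasDig (s : String) : Bool := s.toList.any (fun c => decide ('0' ≤ c) && decide (c ≤ '9'))

-- adjacent-duplicate removal relative to a "previous element" marker (the shape of B's scan)
def dedupAdj : Option String → List String → List String
  | _, [] => []
  | prev, a :: t => if prev = some a then dedupAdj (some a) t else a :: dedupAdj (some a) t

-- B's fold = filter after adjacent dedup
theorem foldB_eq (l : List String) : ∀ (prev : Option String) (acc : List String),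
    (l.foldl
      (fun (st : List String × Option String) s =>
        (if (st.2 != some s) && s.toList.any (fun c => decide ('0' ≤ c) && decide (c ≤ '9'))
         then st.1 ++ [s] else st.1, some s))
      (acc, prev)).1 = acc ++ (dedupAdj prev l).filter hasDig := by
  induction l with
  | nil => intro prev acc; simp [dedupAdj]
  | cons a t ih =>
    intro prev acc
    simp only [List.foldl_cons, dedupAdj]
    by_cases hp : prev = some a
    · have hb : (prev != some a) = false := by simp [hp]
      rw [if_pos hp]
      simp only [hb, Bool.false_and, Bool.false_eq_true, if_false]
      exact ih (some a) acc
    · have hb : (prev != some a) = true := bne_iff_ne.mpr hp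
      rw [if_neg hp]
      simp only [hb, Bool.true_and]
      by_cases hd : hasDig a = true
      · have hd' : (a.toList.any fun c => decide ('0' ≤ c) && decide (c ≤ '9')) = true := by
          simpa [hasDig] using hd
        simp only [hd', if_true]
        rw [ih (some a) (acc ++ [a])]
        simp [hd]
      · have hd' : (a.toList.any fun c => decide ('0' ≤ c) && decide (c ≤ '9')) = false := by
          simpa [hasDig] using hd
        simp only [hd', Bool.false_eq_true, if_false]
        rw [ih (some a) acc]
        simp [hd]

theorem dedupAdj_subset (l : List String) : ∀ (prev : Option String) (y : String),
    y ∈ dedupAdj prev l → y ∈ l := by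
  induction l with
  | nil => intro _ _ h; simp [dedupAdj] at h
  | cons a t ih =>
    intro prev y h
    simp only [dedupAdj] at h
    split at h
    · exact List.mem_cons_of_mem _ (ih _ _ h)
    · rcases List.mem_cons.mp h with rfl | h'
      · exact List.mem_cons_self
      · exact List.mem_cons_of_mem _ (ih _ _ h')

theorem mem_dedupAdj_of_mem (l : List String) : ∀ (prev : Option String) (y : String),
    y ∈ l → y ∈ dedupAdj prev l ∨ prev = some y := by
  induction l with
  | nil => intro _ _ h; simp at h
  | cons a t ih =>
    intro prev y h
    simp only [dedupAdj]
    by_cases hp : prev = some a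
    · rw [if_pos hp]
      rcases List.mem_cons.mp h with rfl | h'
      · exact Or.inr hp
      · rcases ih (some a) y h' with hin | heq
        · exact Or.inl hin
        · exact Or.inr (hp.trans heq)
    · rw [if_neg hp]
      rcases List.mem_cons.mp h with rfl | h'
      · exact Or.inl List.mem_cons_self
      · rcases ih (some a) y h' with hin | heq
        · exact Or.inl (List.mem_cons_of_mem _ hin)
        · exact Or.inl (by simp at heq; simp [heq])

theorem dedupAdj_pairwise (l : List String) : ∀ (prev : Option String),
    l.Pairwise (· ≤ ·) → (∀ pv, prev = some pv → ∀ x ∈ l, pv ≤ x) →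
    (dedupAdj prev l).Pairwise (· < ·) ∧
      (∀ pv, prev = some pv → ∀ y ∈ dedupAdj prev l, pv < y) := by
  induction l with
  | nil => intro prev _ _; exact ⟨List.Pairwise.nil, by intro _ _ y hy; simp [dedupAdj] at hy⟩
  | cons a t ih =>
    intro prev hpair hprev
    have hle : ∀ x ∈ t, a ≤ x := (List.pairwise_cons.mp hpair).1
    have htp : t.Pairwise (· ≤ ·) := (List.pairwise_cons.mp hpair).2
    have iht := ih (some a) htp (by rintro pv rfl'; injection rfl' with h; subst h; exact hle)
    simp only [dedupAdj]
    by_cases hp : prev = some a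
    · rw [if_pos hp]
      refine ⟨iht.1, ?_⟩
      rintro pv hpv y hy
      have : pv = a := by rw [hp] at hpv; injection hpv with h; exact h.symm
      subst this
      exact iht.2 pv rfl y hy
    · rw [if_neg hp]
      have ha_lt : ∀ y ∈ dedupAdj (some a) t, a < y := iht.2 a rfl
      refine ⟨List.pairwise_cons.mpr ⟨ha_lt, iht.1⟩, ?_⟩
      rintro pv hpv y hy
      have hpa : pv ≤ a := hprev pv hpv a List.mem_cons_self
      have hpna : pv ≠ a := by intro h; subst h; exact hp hpv
      have hpa' : pv < a := lt_of_le_of_ne hpa hpna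
      rcases List.mem_cons.mp hy with rfl | hy'
      · exact hpa'
      · exact lt_trans hpa' (ha_lt y hy')

-- B's result characterized
theorem numInStr_alt_eq (sl : List String) :
    numInStr_alt sl = (dedupAdj none (PySem.List.sorted sl (fun x => x) false)).filter hasDig := by
  unfold numInStr_alt
  simpa using foldB_eq (PySem.List.sorted sl (fun x => x) false) none []

theorem B_pairwise_lt (sl : List String) :
    ((dedupAdj none (PySem.List.sorted sl (fun x => x) false)).filter hasDig).Pairwise (· < ·) := by
  have hs : (PySem.List.sorted sl (fun x => x) false).Pairwise (· ≤ ·) := by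
    simpa using PySem.List.sorted_pairwise sl (fun x => x)
  have h := dedupAdj_pairwise (PySem.List.sorted sl (fun x => x) false) none hs
    (by rintro pv h; cases h)
  exact h.1.filter _

theorem B_mem (sl : List String) (y : String) :
    y ∈ (dedupAdj none (PySem.List.sorted sl (fun x => x) false)).filter hasDig ↔
      y ∈ sl ∧ hasDig y = true := by
  rw [List.mem_filter]
  constructor
  · rintro ⟨hy, hd⟩
    exact ⟨(PySem.List.mem_sorted _ _ _ _).mp (dedupAdj_subset _ _ _ hy), hd⟩
  · rintro ⟨hy, hd⟩
    refine ⟨?_, hd⟩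
    have := mem_dedupAdj_of_mem (PySem.List.sorted sl (fun x => x) false) none y
      ((PySem.List.mem_sorted _ _ _ _).mpr hy)
    rcases this with h | h
    · exact h
    · cases h

-- A-side: membership after one inner pass
theorem mem_foldl_addIf (p : String → Bool) (l : List String)
    (s : PySem.Set String) (y : String) :
    (y ∈ l.foldl (fun r x => if p x then PySem.Set.add r x else r) s) ↔
      y ∈ s ∨ (y ∈ l ∧ p y = true) := by
  induction l generalizing s with
  | nil => simp
  | cons a t ih =>
    simp only [List.foldl_cons]
    by_cases h : p a = true
    · simp [h, ih, PySem.Set.mem_add]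
      constructor
      · rintro ((hs | rfl) | ht)
        · exact Or.inl hs
        · exact Or.inr ⟨Or.inl rfl, h⟩
        · exact Or.inr ⟨Or.inr ht.1, ht.2⟩
      · rintro (hs | ⟨rfl | ht, hp⟩)
        · exact Or.inl (Or.inl hs)
        · exact Or.inl (Or.inr rfl)
        · exact Or.inr ⟨ht, hp⟩
    · simp only [h, ih]
      constructor
      · rintro (hs | ⟨ht, hp⟩)
        · exact Or.inl hs
        · exact Or.inr ⟨List.mem_cons_of_mem _ ht, hp⟩
      · rintro (hs | ⟨hm, hp⟩)
        · exact Or.inl hs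
        · rcases List.mem_cons.mp hm with rfl | ht
          · exact absurd hp h
          · exact Or.inr ⟨ht, hp⟩

theorem nodup_foldl_addIf (p : String → Bool) (l : List String)
    (s : PySem.Set String) (hs : s.Nodup) :
    (l.foldl (fun r x => if p x then PySem.Set.add r x else r) s).Nodup := by
  induction l generalizing s with
  | nil => exact hs
  | cons a t ih =>
    simp only [List.foldl_cons]
    by_cases h : p a = true
    · simp only [h, if_true]
      exact ih _ (PySem.Set.nodup_add s a hs)
    · simp only [h]
      exact ih _ hs

-- membership in A's fully built set: in string_list and containing some digit of ds
theorem mem_outer (sl : List String) (ds : List Char) (y : String) :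
    (y ∈ ds.foldl (fun result num =>
        sl.foldl (fun result list_item =>
          if PySem.Str.isIn (String.ofList [num]) list_item then PySem.Set.add result list_item
          else result) result) PySem.Set.empty) ↔
      ∃ d ∈ ds, y ∈ sl ∧ PySem.Str.isIn (String.ofList [d]) y = true := by
  suffices h : ∀ (s : PySem.Set String),
      (y ∈ ds.foldl (fun result num =>
          sl.foldl (fun result list_item =>
            if PySem.Str.isIn (String.ofList [num]) list_item then PySem.Set.add result list_item
            else result) result) s) ↔
        y ∈ s ∨ ∃ d ∈ ds, y ∈ sl ∧ PySem.Str.isIn (String.ofList [d]) y = true by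
    simpa [PySem.Set.empty] using h PySem.Set.empty
  induction ds with
  | nil => simp
  | cons d t ih =>
    intro s
    simp only [List.foldl_cons, ih, mem_foldl_addIf]
    constructor
    · rintro ((hs | ⟨hy, hp⟩) | ⟨e, he, hm⟩)
      · exact Or.inl hs
      · exact Or.inr ⟨d, by simp, hy, hp⟩
      · exact Or.inr ⟨e, by simp [he], hm⟩
    · rintro (hs | ⟨e, he, hm⟩)
      · exact Or.inl (Or.inl hs)
      · rcases List.mem_cons.mp he with rfl | he'
        · exact Or.inl (Or.inr hm)
        · exact Or.inr ⟨e, he', hm⟩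

theorem nodup_outer (sl : List String) (ds : List Char) :
    (ds.foldl (fun result num =>
        sl.foldl (fun result list_item =>
          if PySem.Str.isIn (String.ofList [num]) list_item then PySem.Set.add result list_item
          else result) result) PySem.Set.empty).Nodup := by
  suffices h : ∀ (s : PySem.Set String), s.Nodup →
      (ds.foldl (fun result num =>
        sl.foldl (fun result list_item =>
          if PySem.Str.isIn (String.ofList [num]) list_item then PySem.Set.add result list_item
          else result) result) s).Nodup from
    h PySem.Set.empty (by simp [PySem.Set.empty])
  induction ds with
  | nil => intro s hs; exact hs
  | cons d t ih =>
    intro s hs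
    exact ih _ (nodup_foldl_addIf _ _ _ hs)

-- a one-character string is a substring iff the character occurs
theorem isIn_singleton_iff (d : Char) (s : String) :
    PySem.Str.isIn (String.ofList [d]) s = true ↔ d ∈ s.toList := by
  rw [PySem.Str.isIn_iff_infix]
  constructor
  · intro h
    have h' := h.sublist
    simp only [String.toList_ofList] at h'
    exact List.singleton_sublist.mp h'
  · intro h
    obtain ⟨l1, l2, hl⟩ := List.append_of_mem h
    exact ⟨l1, l2, by simp [hl]⟩

-- B's character-range test = membership of the character among A's ten digit characters
theorem digit_range_iff (c : Char) : ('0' ≤ c ∧ c ≤ '9') ↔ c ∈ "1234567890".toList := by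
  have h : "1234567890".toList = ['1','2','3','4','5','6','7','8','9','0'] := by decide
  rw [h]
  simp only [List.mem_cons, List.not_mem_nil, or_false, Char.ext_iff, UInt32.ext_iff]
  change (48 ≤ c.toNat ∧ c.toNat ≤ 57) ↔ (c.toNat = 49 ∨ c.toNat = 50 ∨ c.toNat = 51 ∨
    c.toNat = 52 ∨ c.toNat = 53 ∨ c.toNat = 54 ∨ c.toNat = 55 ∨ c.toNat = 56 ∨
    c.toNat = 57 ∨ c.toNat = 48)
  omega

theorem numInStr_eq_alt (sl : List String) : numInStr sl = numInStr_alt sl := by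
  rw [numInStr_alt_eq]
  unfold numInStr
  apply PySem.List.sorted_eq_of_perm_of_pairwise_lt
  · apply (List.perm_ext_iff_of_nodup ?_ ?_).mpr
    · intro y
      rw [B_mem, mem_outer]
      simp only [hasDig, List.any_eq_true, Bool.and_eq_true, decide_eq_true_eq]
      constructor
      · rintro ⟨hy, c, hc, hr⟩
        exact ⟨c, (digit_range_iff c).mp hr, hy, (isIn_singleton_iff c y).mpr hc⟩
      · rintro ⟨d, hd, hy, hin⟩
        exact ⟨hy, d, (isIn_singleton_iff d y).mp hin, (digit_range_iff d).mpr hd⟩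
    · exact (B_pairwise_lt sl).imp ne_of_lt
    · exact nodup_outer sl _
  · simpa using B_pairwise_lt sl

-- ===== VERDICT (by name: the statement is the Claim_ definition above) =====
theorem numInStr_spec : Claim_equal_numInStr := by
  intro sl _
  exact numInStr_eq_alt sl
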